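-- pv_equiv track=rewrite | github.com/kuleczkomen/DSA | excercises/coal/coal_nlogn.py | coal
-- ===== SOURCE A (Python) =====
-- class SegmentTree:
--     def __init__(self, n):
--         self.size = 1
--         while self.size < n:
--             self.size <<= 1
--         self.tree = [0] * (2 * self.size)
--
--     def update(self, i, val):
--         i += self.size
--         self.tree[i] = val
--         i //= 2
--         while i > 0:
--             self.tree[i] = max(self.tree[2*i], self.tree[2*i+1])
--             i //= 2
--
--     def query(self, transport, idx=1, left=0, right=None):
--         if right is None:
--             right = self.size
--         if self.tree[idx] < transport:
--             return -1
--         if right - left == 1: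
--             return left
--         mid = (left + right) // 2
--         res = self.query(transport, 2*idx, left, mid)
--         if res == -1:
--             res = self.query(transport, 2*idx+1, mid, right)
--         return res
--
-- def coal(A, T):
--     n = len(A)
--     wolne = []
--     tree = SegmentTree(n)
--
--     last = 0
--     for i, transport in enumerate(A):
--         if len(wolne) == 0:
--             # pierwszy magazyn
--             wolne.append(T - transport)
--             tree.update(0, wolne[0])
--             last = 0
--             continue
--
--         idx = tree.query(transport)
--         if idx == -1 or idx >= len(wolne):
--             # nowy magazyn
--             wolne.append(T - transport)
--             tree.update(len(wolne)-1, wolne[-1])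
--             last = len(wolne)-1
--         else:
--             wolne[idx] -= transport
--             tree.update(idx, wolne[idx])
--             last = idx
--
--     return last
-- ===== SOURCE B (Python) =====
-- def coal(A, T):
--     # First-fit by a plain left-to-right scan over remaining capacities; no segment tree.
--     wolne = []
--     last = 0
--     for transport in A:
--         j = next((k for k, w in enumerate(wolne) if w >= transport), None)
--         if j is None:
--             wolne.append(T - transport)
--             last = len(wolne) - 1
--         else:
--             wolne[j] -= transport
--             last = j
--     return last
-- ===== Notes on version B (the rewrite author's own statement) =====
-- stated objective: simpler
-- what changed: Replaced the segment-tree (build/update/query) machinery with a plain list of remaining capacities scanned left-to-right for the first fit, which is what the first-fit rule says directly.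
import Mathlib
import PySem

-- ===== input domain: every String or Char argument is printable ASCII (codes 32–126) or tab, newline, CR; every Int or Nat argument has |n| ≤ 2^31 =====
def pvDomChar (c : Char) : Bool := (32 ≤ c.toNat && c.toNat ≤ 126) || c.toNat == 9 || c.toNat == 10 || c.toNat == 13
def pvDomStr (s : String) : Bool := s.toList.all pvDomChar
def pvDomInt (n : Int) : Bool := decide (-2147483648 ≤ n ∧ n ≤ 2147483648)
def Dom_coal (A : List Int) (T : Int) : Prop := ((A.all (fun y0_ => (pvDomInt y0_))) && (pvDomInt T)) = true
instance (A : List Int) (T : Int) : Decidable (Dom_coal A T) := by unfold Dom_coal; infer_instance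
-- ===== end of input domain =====

-- B drops A's segment tree and finds the first-fit warehouse by a plain left-to-right scan: simpler, same results.

-- ===== PORT A =====

-- `while self.size < n: self.size <<= 1`, started from 1 (the 1 ≤ size argument only justifies termination)
def sizeLoop (n : Nat) (size : Nat) (h : 1 ≤ size) : Nat :=
  if hlt : size < n then sizeLoop n (2*size) (by omega) else size
termination_by n - size
decreasing_by omega

-- `i //= 2; while i > 0: self.tree[i] = max(self.tree[2*i], self.tree[2*i+1]); i //= 2`
def updLoop (tree : List Int) (j : Nat) : List Int :=
  if h : 0 < j then
    updLoop (tree.set j (max (tree.getD (2*j) 0) (tree.getD (2*j+1) 0))) (j / 2)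
  else tree
termination_by j
decreasing_by exact Nat.div_lt_self h one_lt_two

-- SegmentTree.update (all indices touched are in range, so getD/set are exact)
def update (size : Nat) (tree : List Int) (i : Nat) (val : Int) : List Int :=
  updLoop (tree.set (i + size) val) ((i + size) / 2)

-- SegmentTree.query; the fuel only makes the halving recursion structural, it is never exhausted on real calls
def queryGo (fuel : Nat) (tree : List Int) (t : Int) (idx left right : Nat) : Int :=
  match fuel with
  | 0 => -1
  | fuel+1 =>
    if tree.getD idx 0 < t then -1
    else if right - left = 1 then (left : Int)
    else
      let mid := (left + right)/2
      let res := queryGo fuel tree t (2*idx) left mid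
      if res = -1 then queryGo fuel tree t (2*idx+1) mid right else res

-- loop body of A's `for i, transport in enumerate(A)` (state: wolne, tree.tree, last)
def stepA (size : Nat) (T : Int) (st : List Int × List Int × Int) (transport : Int) :
    List Int × List Int × Int :=
  let wolne := st.1
  let tree := st.2.1
  if wolne.length = 0 then
    ([T - transport], update size tree 0 (T - transport), 0)
  else
    let idx := queryGo size tree transport 1 0 size
    if idx = -1 ∨ (wolne.length : Int) ≤ idx then
      (wolne ++ [T - transport], update size tree wolne.length (T - transport), (wolne.length : Int))
    else
      let j := idx.toNat
      (wolne.set j (wolne.getD j 0 - transport), update size tree j (wolne.getD j 0 - transport), idx)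

def coal (A : List Int) (T : Int) : Int :=
  let size := sizeLoop A.length 1 (by omega)
  (A.foldl (stepA size T) ([], List.replicate (2*size) 0, 0)).2.2

-- ===== PORT B =====

-- `next((k for k, w in enumerate(wolne) if w >= transport), None)`
def firstFit (wolne : List Int) (t : Int) : Option Nat :=
  match wolne with
  | [] => none
  | w :: ws => if t ≤ w then some 0 else (firstFit ws t).map (· + 1)

-- loop body of B's `for transport in A` (state: wolne, last)
def stepB (T : Int) (st : List Int × Int) (transport : Int) : List Int × Int :=
  match firstFit st.1 transport with
  | some j => (st.1.set j (st.1.getD j 0 - transport), (j : Int))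
  | none => (st.1 ++ [T - transport], (st.1.length : Int))

def coal_alt (A : List Int) (T : Int) : Int :=
  (A.foldl (stepB T) ([], 0)).2

-- ===== PRECONDITION & SPEC =====
def Spec_coal (A : List Int) (T : Int) (out : Int) : Prop := out = coal_alt A T
instance (A : List Int) (T : Int) (out : Int) : Decidable (Spec_coal A T out) := by unfold Spec_coal; infer_instance

-- ===== CLAIM (what is proved, stated in full; the proofs are below) =====
def Claim_equal_coal : Prop := ∀ (A : List Int) (T : Int), Dom_coal A T → Spec_coal A T (coal A T)

-- ===== LEMMAS AND PROOFS =====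

-- abstract array represented by the tree: wolne padded with zeros
def vOf (w : List Int) : Nat → Int := fun j => w.getD j 0
def vUpd (v : Nat → Int) (i : Nat) (x : Int) : Nat → Int := fun j => if j = i then x else v j

-- value a correct segment tree stores at heap position p
def nodeVal (v : Nat → Int) (size p : Nat) : Int :=
  if hsz : size ≤ p then v (p - size)
  else if hp : p = 0 then 0
  else max (nodeVal v size (2*p)) (nodeVal v size (2*p+1))
termination_by 2*size - p
decreasing_by all_goals omega

def treeOf (v : Nat → Int) (size : Nat) : List Int :=
  List.ofFn (n := 2*size) fun p => nodeVal v size p.1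

-- leftmost index in [l, l+s) whose value is ≥ t, else -1 (what query computes)
def firstHit (v : Nat → Int) (t : Int) (l s : Nat) : Int :=
  if s = 0 then -1
  else if t ≤ v l then (l : Int) else firstHit v t (l+1) (s-1)
termination_by s

-- getD after set, spelled out once
theorem getD_set' (l : List Int) (i : Nat) (a : Int) (p : Nat) :
    (l.set i a).getD p 0 = if p = i ∧ i < l.length then a else l.getD p 0 := by
  simp [List.getD_eq_getElem?_getD, List.getElem?_set]
  split_ifs <;> simp_all

theorem getD_oob (l : List Int) (p : Nat) (h : l.length ≤ p) : l.getD p 0 = 0 := by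
  simp [List.getD_eq_getElem?_getD, List.getElem?_eq_none_iff.mpr h]

theorem div2_pow_succ (L e : Nat) : L / 2^e / 2 = L / 2^(e+1) := by
  rw [Nat.div_div_eq_div_mul, pow_succ]

theorem div_pow_antitone (L d e : Nat) (h : d ≤ e) : L / 2^e ≤ L / 2^d := by
  gcongr
  norm_num

theorem sizeLoop_ge (n : Nat) : ∀ size h, n ≤ sizeLoop n size h ∧ size ≤ sizeLoop n size h := by
  intro size h
  fun_induction sizeLoop n size h with
  | case1 size h hlt ih => omega
  | case2 size h hlt => omega

theorem sizeLoop_pow (n : Nat) : ∀ size h, (∃ k, size = 2^k) → ∃ K, sizeLoop n size h = 2^K := by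
  intro size h
  fun_induction sizeLoop n size h with
  | case1 size h hlt ih =>
      intro hk
      obtain ⟨k, hk⟩ := hk
      exact ih ⟨k+1, by rw [hk, pow_succ]; ring⟩
  | case2 size h hlt => intro hk; exact hk

theorem nodeVal_zero (size : Nat) : ∀ p, nodeVal (fun _ => 0) size p = 0 := by
  intro p
  fun_induction nodeVal (fun _ => 0) size p with
  | case1 p hsz => rfl
  | case2 hsz => rfl
  | case3 p hsz hp0 ih1 ih2 => rw [ih1, ih2]; simp

theorem nodeVal_congr (size : Nat) (_hsz : 1 ≤ size) (v v' : Nat → Int) (L : Nat)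
    (hvv' : ∀ q, size + q ≠ L → v q = v' q) :
    ∀ p, (∀ e, L / 2^e ≠ p) → nodeVal v size p = nodeVal v' size p := by
  intro p
  fun_induction nodeVal v size p with
  | case1 p hle =>
      intro hp
      rw [nodeVal]; simp only [dif_pos hle]
      refine hvv' _ ?_
      have := hp 0
      simp only [pow_zero, Nat.div_one] at this
      omega
  | case2 hle =>
      intro hp
      conv_rhs => rw [nodeVal]
      simp only [dif_neg hle]
      simp
  | case3 p hle hp0 ih1 ih2 =>
      intro hp
      conv_rhs => rw [nodeVal]
      simp only [dif_neg hle, dif_neg hp0]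
      have h1 : ∀ e, L / 2^e ≠ 2*p := by
        intro e he
        exact hp (e+1) (by rw [← div2_pow_succ, he]; omega)
      have h2 : ∀ e, L / 2^e ≠ 2*p+1 := by
        intro e he
        exact hp (e+1) (by rw [← div2_pow_succ, he]; omega)
      rw [ih1 h1, ih2 h2]

theorem node_lt_size (K k idx : Nat) (hhi : (idx+1) * 2^(k+1) ≤ 2*2^K) : idx < 2^K := by
  have h2 : (2:Nat) ≤ 2^(k+1) := by
    calc (2:Nat) = 2^1 := by norm_num
    _ ≤ 2^(k+1) := Nat.pow_le_pow_right (by norm_num) (by omega)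
  have h1 : (idx+1) * 2 ≤ (idx+1) * 2^(k+1) := Nat.mul_le_mul_left _ h2
  omega

theorem nodeVal_ub (v : Nat → Int) (K : Nat) :
    ∀ k idx, k ≤ K → 2^K ≤ idx * 2^k → (idx+1) * 2^k ≤ 2*2^K →
      ∀ j, j < 2^k → v (idx*2^k - 2^K + j) ≤ nodeVal v (2^K) idx := by
  intro k
  induction k with
  | zero =>
      intro idx hkK hlo hhi j hj
      interval_cases j
      have hle : 2^K ≤ idx := by simpa using hlo
      rw [nodeVal]; simp only [dif_pos hle]
      simp only [pow_zero, Nat.mul_one, Nat.add_zero]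
      exact le_refl _
  | succ k ih =>
      intro idx hkK hlo hhi j hj
      have h2k : (0:Nat) < 2^k := Nat.two_pow_pos k
      have hs : (2:Nat)^(k+1) = 2*2^k := by rw [pow_succ]; ring
      have hidx : idx < 2^K := node_lt_size K k idx hhi
      have hidx0 : idx ≠ 0 := by
        intro h; rw [h] at hlo; simp at hlo
      have e1 : 2*idx * 2^k = idx * 2^(k+1) := by rw [hs]; ring
      have e2 : (2*idx+1) * 2^k = idx * 2^(k+1) + 2^k := by rw [hs]; ring
      have e3 : (2*idx+1+1) * 2^k = (idx+1) * 2^(k+1) := by rw [hs]; ring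
      have g1 : 2^K ≤ 2*idx * 2^k := by rw [e1]; exact hlo
      have g2 : (2*idx+1) * 2^k ≤ 2*2^K := by
        calc (2*idx+1) * 2^k ≤ (2*idx+1+1) * 2^k := Nat.mul_le_mul_right _ (by omega)
        _ = (idx+1) * 2^(k+1) := e3
        _ ≤ 2*2^K := hhi
      have g3 : 2^K ≤ (2*idx+1) * 2^k := by rw [e2]; omega
      have g4 : (2*idx+1+1) * 2^k ≤ 2*2^K := by rw [e3]; exact hhi
      rw [nodeVal]
      simp only [dif_neg (by omega : ¬ (2^K ≤ idx)), dif_neg hidx0]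
      by_cases hjk : j < 2^k
      · refine le_trans ?_ (le_max_left _ _)
        have := ih (2*idx) (by omega) g1 g2 j hjk
        rw [e1] at this
        exact this
      · refine le_trans ?_ (le_max_right _ _)
        have := ih (2*idx+1) (by omega) g3 g4 (j - 2^k) (by omega)
        rw [e2] at this
        have harg : idx * 2^(k+1) + 2^k - 2^K + (j - 2^k) = idx * 2^(k+1) - 2^K + j := by omega
        rw [harg] at this
        exact this

theorem firstHit_zero (v : Nat → Int) (t : Int) (l : Nat) : firstHit v t l 0 = -1 := by
  rw [firstHit]; simp

theorem firstHit_succ (v : Nat → Int) (t : Int) (l s : Nat) :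
    firstHit v t l (s+1) = if t ≤ v l then (l : Int) else firstHit v t (l+1) s := by
  rw [firstHit]; simp

theorem firstHit_neg (v : Nat → Int) (t : Int) : ∀ s l, (∀ j, j < s → v (l+j) < t) →
    firstHit v t l s = -1 := by
  intro s
  induction s with
  | zero => intro l h; exact firstHit_zero v t l
  | succ s ih =>
      intro l h
      have h0 := h 0 (by omega)
      simp only [Nat.add_zero] at h0
      rw [firstHit_succ, if_neg (by omega)]
      refine ih (l+1) ?_
      intro j hj
      have := h (j+1) (by omega)
      have e : l + (j+1) = l + 1 + j := by omega
      rw [e] at this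
      exact this

theorem firstHit_split (v : Nat → Int) (t : Int) : ∀ a l b,
    firstHit v t l (a+b) =
      (if firstHit v t l a = -1 then firstHit v t (l+a) b else firstHit v t l a) := by
  intro a
  induction a with
  | zero => intro l b; rw [Nat.zero_add, firstHit_zero, if_pos rfl, Nat.add_zero]
  | succ a ih =>
      intro l b
      have hsum : a + 1 + b = (a + b) + 1 := by omega
      rw [hsum, firstHit_succ, firstHit_succ]
      by_cases h0 : t ≤ v l
      · rw [if_pos h0, if_pos h0, if_neg (by omega)]
      · rw [if_neg h0, if_neg h0, ih (l+1) b]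
        have : l + 1 + a = l + (a+1) := by omega
        rw [this]

theorem treeOf_getD (v : Nat → Int) (size p : Nat) (hp : p < 2*size) :
    (treeOf v size).getD p 0 = nodeVal v size p := by
  unfold treeOf
  simp [List.getD_eq_getElem?_getD, hp]

theorem queryGo_eq (v : Nat → Int) (K : Nat) (t : Int) :
    ∀ k idx fuel, k ≤ K → 2^K ≤ idx * 2^k → (idx+1) * 2^k ≤ 2*2^K → 2^k ≤ fuel →
      queryGo fuel (treeOf v (2^K)) t idx (idx*2^k - 2^K) (idx*2^k - 2^K + 2^k) =
        firstHit v t (idx*2^k - 2^K) (2^k) := by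
  intro k
  induction k with
  | zero =>
      intro idx fuel hkK hlo hhi hfuel
      simp only [pow_zero, Nat.mul_one] at hlo hhi ⊢
      obtain ⟨f, rfl⟩ : ∃ f, fuel = f + 1 := ⟨fuel - 1, by omega⟩
      rw [queryGo]
      have hplt : idx < 2*2^K := by omega
      have hnv : nodeVal v (2^K) idx = v (idx - 2^K) := by
        rw [nodeVal]; simp only [dif_pos hlo]
      rw [treeOf_getD v _ idx hplt, hnv]
      rw [show (1:Nat) = 0 + 1 from rfl, firstHit_succ, firstHit_zero]
      by_cases ht : t ≤ v (idx - 2^K)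
      · rw [if_neg (by omega), if_pos (by omega), if_pos ht]
      · rw [if_pos (by omega), if_neg ht]
  | succ k ih =>
      intro idx fuel hkK hlo hhi hfuel
      have h2k : (0:Nat) < 2^k := Nat.two_pow_pos k
      have hs : (2:Nat)^(k+1) = 2*2^k := by rw [pow_succ]; ring
      have hidx : idx < 2^K := node_lt_size K k idx hhi
      have hKpos : (0:Nat) < 2^K := Nat.two_pow_pos K
      have hidx0 : idx ≠ 0 := by
        intro h; rw [h] at hlo; simp at hlo
      have e1 : 2*idx * 2^k = idx * 2^(k+1) := by rw [hs]; ring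
      have e2 : (2*idx+1) * 2^k = idx * 2^(k+1) + 2^k := by rw [hs]; ring
      have e3 : (2*idx+1+1) * 2^k = (idx+1) * 2^(k+1) := by rw [hs]; ring
      have g1 : 2^K ≤ 2*idx * 2^k := by rw [e1]; exact hlo
      have g2 : (2*idx+1) * 2^k ≤ 2*2^K := by
        calc (2*idx+1) * 2^k ≤ (2*idx+1+1) * 2^k := Nat.mul_le_mul_right _ (by omega)
        _ = (idx+1) * 2^(k+1) := e3
        _ ≤ 2*2^K := hhi
      have g3 : 2^K ≤ (2*idx+1) * 2^k := by rw [e2]; omega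
      have g4 : (2*idx+1+1) * 2^k ≤ 2*2^K := by rw [e3]; exact hhi
      obtain ⟨f, rfl⟩ : ∃ f, fuel = f + 1 := ⟨fuel - 1, by omega⟩
      rw [queryGo]
      have hplt : idx < 2*2^K := by
        have : (idx+1) * 2^(k+1) ≤ 2*2^K := hhi
        omega
      rw [treeOf_getD v _ idx hplt]
      by_cases hc : nodeVal v (2^K) idx < t
      · rw [if_pos hc]
        refine (firstHit_neg v t _ _ ?_).symm
        intro j hj
        have := nodeVal_ub v K (k+1) idx hkK hlo hhi j hj
        omega
      · rw [if_neg hc]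
        have hne1 : ¬ (idx * 2^(k+1) - 2^K + 2^(k+1) - (idx * 2^(k+1) - 2^K) = 1) := by omega
        rw [if_neg hne1]
        have hleft := ih (2*idx) f (by omega) g1 g2 (by omega)
        rw [e1] at hleft
        have hright := ih (2*idx+1) f (by omega) g3 g4 (by omega)
        rw [e2] at hright
        have hr1 : idx * 2^(k+1) + 2^k - 2^K = idx * 2^(k+1) - 2^K + 2^k := by omega
        rw [hr1] at hright
        have hmid : (idx * 2^(k+1) - 2^K + (idx * 2^(k+1) - 2^K + 2^(k+1))) / 2 =
            idx * 2^(k+1) - 2^K + 2^k := by omega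
        have hsplit := firstHit_split v t (2^k) (idx * 2^(k+1) - 2^K) (2^k)
        have hss : 2^k + 2^k = 2^(k+1) := by omega
        rw [hss] at hsplit
        simp only [hmid, hleft, hsplit]
        by_cases hz : firstHit v t (idx * 2^(k+1) - 2^K) (2^k) = -1
        · rw [if_pos hz, if_pos hz]
          rw [show idx * 2^(k+1) - 2^K + 2^k + 2^k = idx * 2^(k+1) - 2^K + 2^(k+1) by omega] at hright
          exact hright
        · rw [if_neg hz, if_neg hz]

theorem updLoop_length : ∀ (tree : List Int) (j : Nat), (updLoop tree j).length = tree.length := by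
  intro tree j
  fun_induction updLoop tree j with
  | case1 tree j h ih => rw [ih]; simp
  | case2 tree j h => rfl

theorem updLoop_spec (K : Nat) (v v' : Nat → Int) (i : Nat) (hi : i < 2^K)
    (hvv' : ∀ q, q ≠ i → v q = v' q) :
    ∀ j, ∀ d (tree : List Int), 1 ≤ d → j = (2^K + i) / 2^d → tree.length = 2*2^K →
    (∀ p, p < 2*2^K → tree.getD p 0 =
        if ∃ e, e < d ∧ (2^K + i) / 2^e = p then nodeVal v' (2^K) p else nodeVal v (2^K) p) →
    ∀ p, p < 2*2^K → (updLoop tree j).getD p 0 = nodeVal v' (2^K) p := by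
  have hK1 : (0:Nat) < 2^K := Nat.two_pow_pos K
  have hcongr : ∀ p, (∀ e, (2^K + i) / 2^e ≠ p) → nodeVal v (2^K) p = nodeVal v' (2^K) p :=
    nodeVal_congr (2^K) hK1 v v' (2^K + i) (fun q hq => hvv' q (by omega))
  intro j
  induction j using Nat.strong_induction_on with
  | _ j IH =>
    intro d tree hd hj hlen hinv p hp
    rw [updLoop]
    by_cases hj0 : 0 < j
    · simp only [dif_pos hj0]
      -- facts about j
      have hjle : j ≤ (2^K + i) / 2 := by
        rw [hj]
        calc (2^K + i) / 2^d ≤ (2^K + i) / 2^1 := div_pow_antitone _ 1 d hd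
        _ = (2^K + i) / 2 := by norm_num
      have hjlt : j < 2^K := by omega
      -- the path child c1 and the sibling
      have hc1 : (2^K + i) / 2^(d-1) / 2 = j := by
        rw [div2_pow_succ]
        have : d - 1 + 1 = d := by omega
        rw [this, hj]
      set c1 := (2^K + i) / 2^(d-1) with hc1def
      have hc1j : c1 = 2*j ∨ c1 = 2*j + 1 := by omega
      have hnot_sib : ∀ c, c / 2 = j → c ≠ c1 → (2*j ≤ c ∧ c ≤ 2*j+1) → ∀ e, (2^K + i) / 2^e ≠ c := by
        intro c hc2 hcne hcb e he
        rcases Nat.lt_trichotomy e (d-1) with hlt | heq | hgt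
        · -- e ≤ d-2 : (2^K+i)/2^(e+1) = j but also ≥ c1 ≥ 2j
          have h1 : (2^K + i) / 2^(e+1) = c / 2 := by rw [← div2_pow_succ, he]
          have h2 : c1 ≤ (2^K + i) / 2^(e+1) := div_pow_antitone _ (e+1) (d-1) (by omega)
          omega
        · rw [heq] at he; exact hcne he.symm
        · have h1 : (2^K + i) / 2^e ≤ (2^K + i) / 2^d := div_pow_antitone _ d e (by omega)
          rw [← hj] at h1
          omega
      -- values of the two children in tree
      have hchild : ∀ c, c / 2 = j → (2*j ≤ c ∧ c ≤ 2*j+1) → tree.getD c 0 = nodeVal v' (2^K) c := by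
        intro c hc2 hcb
        have hclt : c < 2*2^K := by omega
        by_cases hcc : c = c1
        · rw [hinv c hclt, if_pos ⟨d-1, by omega, by rw [← hc1def, hcc]⟩]
        · have hnone := hnot_sib c hc2 hcc hcb
          rw [hinv c hclt, if_neg (by rintro ⟨e, he, hee⟩; exact hnone e hee)]
          exact hcongr c hnone
      have hch1 : tree.getD (2*j) 0 = nodeVal v' (2^K) (2*j) := hchild (2*j) (by omega) (by omega)
      have hch2 : tree.getD (2*j+1) 0 = nodeVal v' (2^K) (2*j+1) := hchild (2*j+1) (by omega) (by omega)
      have hnewval : max (tree.getD (2*j) 0) (tree.getD (2*j+1) 0) = nodeVal v' (2^K) j := by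
        rw [hch1, hch2]
        conv_rhs => rw [nodeVal]
        simp only [dif_neg (by omega : ¬ (2^K ≤ j)), dif_neg (by omega : ¬ (j = 0))]
      -- apply IH at j/2, depth d+1
      refine IH (j/2) (by omega) (d+1) _ (by omega) (by rw [← div2_pow_succ, hj]) (by simp [hlen]) ?_ p hp
      intro q hq
      rw [getD_set']
      by_cases hqj : q = j
      · rw [if_pos ⟨hqj, by omega⟩, hqj, hnewval, if_pos ⟨d, by omega, hj.symm⟩]
      · rw [if_neg (by simp [hqj]), hinv q hq]
        have hiff : (∃ e, e < d+1 ∧ (2^K + i) / 2^e = q) ↔ (∃ e, e < d ∧ (2^K + i) / 2^e = q) := by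
          constructor
          · rintro ⟨e, he, hee⟩
            refine ⟨e, ?_, hee⟩
            rcases Nat.lt_or_ge e d with h | h
            · exact h
            · exfalso; have : e = d := by omega
              rw [this, ← hj] at hee; exact hqj hee.symm
          · rintro ⟨e, he, hee⟩; exact ⟨e, by omega, hee⟩
        by_cases hex : ∃ e, e < d ∧ (2^K + i) / 2^e = q
        · rw [if_pos hex, if_pos (hiff.mpr hex)]
        · rw [if_neg hex, if_neg (by rw [hiff]; exact hex)]
    · simp only [dif_neg hj0]
      have hj00 : j = 0 := by omega
      by_cases hp0 : p = 0
      · have hz : ∀ w : Nat → Int, nodeVal w (2^K) 0 = 0 := by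
          intro w; rw [nodeVal]
          simp only [dif_neg (by omega : ¬ (2^K ≤ 0))]
          simp
        rw [hinv p hp, hp0]
        by_cases hex : ∃ e, e < d ∧ (2^K + i) / 2^e = 0
        · rw [if_pos hex]
        · rw [if_neg hex, hz, hz]
      · rw [hinv p hp]
        by_cases hex : ∃ e, e < d ∧ (2^K + i) / 2^e = p
        · rw [if_pos hex]
        · rw [if_neg hex]
          refine hcongr p ?_
          intro e he
          rcases Nat.lt_or_ge e d with h | h
          · exact hex ⟨e, h, he⟩
          · have h1 : (2^K + i) / 2^e ≤ (2^K + i) / 2^d := div_pow_antitone _ d e h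
            rw [← hj, hj00] at h1
            omega

theorem update_correct (K : Nat) (v : Nat → Int) (i : Nat) (hi : i < 2^K) (val : Int) :
    update (2^K) (treeOf v (2^K)) i val = treeOf (vUpd v i val) (2^K) := by
  have hK1 : (0:Nat) < 2^K := Nat.two_pow_pos K
  have hlenOf : (treeOf v (2^K)).length = 2*2^K := by simp [treeOf]
  have hlen1 : ((treeOf v (2^K)).set (i + 2^K) val).length = 2*2^K := by simp [hlenOf]
  unfold update
  have key := updLoop_spec K v (vUpd v i val) i hi
    (fun q hq => by simp [vUpd, hq]) ((i + 2^K)/2) 1 _ (le_refl 1)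
    (by norm_num; omega) hlen1 ?_
  · refine List.ext_getElem ?_ ?_
    · rw [updLoop_length, hlen1]; simp [treeOf]
    · intro p h1 h2
      have hp : p < 2*2^K := by simpa [treeOf] using h2
      have e1 : (updLoop ((treeOf v (2^K)).set (i + 2^K) val) ((i + 2^K)/2)).getD p 0 =
          (updLoop ((treeOf v (2^K)).set (i + 2^K) val) ((i + 2^K)/2))[p] := by
        refine List.getD_eq_getElem _ 0 ?_
      rw [← e1, key p hp, ← treeOf_getD (vUpd v i val) (2^K) p hp]
      exact List.getD_eq_getElem _ 0 h2
  · intro p hp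
    rw [getD_set']
    by_cases hpL : p = i + 2^K
    · rw [if_pos ⟨hpL, by omega⟩, if_pos ⟨0, by omega, by simp; omega⟩, hpL, nodeVal]
      simp only [dif_pos (by omega : 2^K ≤ i + 2^K)]
      simp [vUpd]
    · rw [if_neg (by simp [hpL]), treeOf_getD v _ p hp]
      rw [if_neg ?_]
      rintro ⟨e, he, hee⟩
      have : e = 0 := by omega
      rw [this] at hee; simp at hee; omega

theorem firstFit_lt (t : Int) : ∀ (w : List Int) j, firstFit w t = some j → j < w.length := by
  intro w
  induction w with
  | nil => intro j h; simp [firstFit] at h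
  | cons x ws ih =>
      intro j h
      rw [firstFit] at h
      by_cases hx : t ≤ x
      · rw [if_pos hx] at h; simp at h; simp [← h]
      · rw [if_neg hx] at h
        cases hf : firstFit ws t with
        | none => rw [hf] at h; simp at h
        | some j' =>
            rw [hf] at h; simp at h
            have := ih j' hf
            simp [← h]; omega

theorem firstHit_shift (t : Int) : ∀ (s : Nat) (l : Nat) (x : Int) (w : List Int),
    firstHit (vOf (x :: w)) t (l+1) s =
      (if firstHit (vOf w) t l s = -1 then -1 else firstHit (vOf w) t l s + 1) := by
  intro s
  induction s with
  | zero => intro l x w; rw [firstHit_zero, firstHit_zero, if_pos rfl]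
  | succ s ih =>
      intro l x w
      rw [firstHit_succ, firstHit_succ]
      have hv : vOf (x :: w) (l+1) = vOf w l := by simp [vOf]
      rw [hv]
      by_cases h0 : t ≤ vOf w l
      · rw [if_pos h0, if_pos h0, if_neg (by omega : ¬ ((l:Int) = -1))]
        push_cast; ring
      · rw [if_neg h0, if_neg h0, ih (l+1) x w]

theorem firstHit_firstFit (t : Int) : ∀ (w : List Int),
    firstHit (vOf w) t 0 w.length =
      (match firstFit w t with
       | some j => (j : Int)
       | none => -1) := by
  intro w
  induction w with
  | nil => rw [List.length_nil, firstHit_zero, firstFit]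
  | cons x ws ih =>
      rw [List.length_cons, firstHit_succ, firstFit]
      have hv0 : vOf (x :: ws) 0 = x := by simp [vOf]
      rw [hv0]
      by_cases hx : t ≤ x
      · rw [if_pos hx, if_pos hx]
      · rw [if_neg hx, if_neg hx]
        rw [show (0:Nat) + 1 = 0 + 1 from rfl, firstHit_shift t ws.length 0 x ws, ih]
        cases hf : firstFit ws t with
        | none => simp
        | some j => simp

theorem firstHit_vOf (w : List Int) (t : Int) (size : Nat) (hw : w.length ≤ size) :
    firstHit (vOf w) t 0 size =
      (match firstFit w t with
       | some j => ((j : Int))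
       | none => if t ≤ 0 ∧ w.length < size then ((w.length : Int)) else -1) := by
  have hsplit := firstHit_split (vOf w) t w.length 0 (size - w.length)
  have hsz : w.length + (size - w.length) = size := by omega
  rw [hsz] at hsplit
  rw [hsplit, firstHit_firstFit]
  cases hf : firstFit w t with
  | some j => simp
  | none =>
      simp only [Nat.zero_add]
      -- firstHit over the zero-padding
      by_cases hlt : w.length < size
      · obtain ⟨s, hs⟩ : ∃ s, size - w.length = s + 1 := ⟨size - w.length - 1, by omega⟩
        rw [hs, firstHit_succ]
        rw [show vOf w w.length = 0 from getD_oob w _ (le_refl _)]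
        by_cases ht : t ≤ 0
        · rw [if_pos ht, if_pos (show t ≤ 0 ∧ w.length < size from ⟨ht, hlt⟩)]
          simp
        · rw [if_neg ht, if_neg (show ¬ (t ≤ 0 ∧ w.length < size) from fun hc => ht hc.1)]
          refine firstHit_neg (vOf w) t s (w.length + 1) ?_
          intro j hj
          rw [show vOf w (w.length + 1 + j) = 0 from getD_oob w _ (by omega)]
          omega
      · have h0 : size - w.length = 0 := by omega
        rw [h0, firstHit_zero,
          if_neg (show ¬ (t ≤ 0 ∧ w.length < size) from fun hc => hlt hc.2)]
        simp

theorem vOf_set (w : List Int) (j : Nat) (x : Int) (hj : j < w.length) :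
    vOf (w.set j x) = vUpd (vOf w) j x := by
  funext q
  simp only [vOf, vUpd]
  rw [getD_set']
  by_cases hq : q = j
  · rw [if_pos ⟨hq, hj⟩, if_pos hq]
  · rw [if_neg (by simp [hq]), if_neg hq]

theorem vOf_append (w : List Int) (x : Int) :
    vOf (w ++ [x]) = vUpd (vOf w) w.length x := by
  funext q
  simp only [vOf, vUpd]
  rcases Nat.lt_trichotomy q w.length with h | h | h
  · rw [if_neg (by omega)]
    simp [List.getD_eq_getElem?_getD, List.getElem?_append_left h]
  · rw [if_pos h, h]
    simp [List.getD_eq_getElem?_getD]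
  · rw [if_neg (by omega), getD_oob _ _ (by simp; omega), getD_oob _ _ (by omega)]

theorem coal_fold (K : Nat) (T : Int) :
    ∀ (rem w : List Int) (last : Int),
      w.length + rem.length ≤ 2^K →
      (rem.foldl (stepA (2^K) T) (w, treeOf (vOf w) (2^K), last)).2.2 =
        (rem.foldl (stepB T) (w, last)).2 := by
  intro rem
  induction rem with
  | nil => intro w last h; rfl
  | cons t rem ih =>
      intro w last h
      rw [List.foldl_cons, List.foldl_cons]
      have hwlt : w.length < 2^K := by simp at h; omega
      by_cases hw0 : w.length = 0
      · -- first transport: A's special branch, B's none branch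
        have hwnil : w = [] := List.length_eq_zero_iff.mp hw0
        subst hwnil
        have hA : stepA (2^K) T ([], treeOf (vOf []) (2^K), last) t =
            ([T - t], update (2^K) (treeOf (vOf []) (2^K)) 0 (T - t), 0) := by
          simp [stepA]
        have hB : stepB T (([] : List Int), last) t = ([T - t], 0) := by
          simp [stepB, firstFit]
        rw [hA, hB]
        have htree : update (2^K) (treeOf (vOf []) (2^K)) 0 (T - t) =
            treeOf (vOf [T - t]) (2^K) := by
          have hveq : vOf [T - t] = vUpd (vOf []) 0 (T - t) := by
            funext q
            cases q with
            | zero => simp [vOf, vUpd]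
            | succ q => simp [vOf, vUpd]
          rw [update_correct K (vOf []) 0 (Nat.two_pow_pos K) (T - t), hveq]
        rw [htree]
        exact ih [T - t] 0 (by simp at h ⊢; omega)
      · -- general step: query = firstFit
        have hwle : w.length ≤ 2^K := by omega
        have hq : queryGo (2^K) (treeOf (vOf w) (2^K)) t 1 0 (2^K) =
            firstHit (vOf w) t 0 (2^K) := by
          have hqe := queryGo_eq (vOf w) K t K 1 (2^K) (le_refl K) (by omega) (by omega) (le_refl _)
          rw [one_mul, Nat.sub_self, Nat.zero_add] at hqe
          exact hqe
        rw [firstHit_vOf w t (2^K) hwle] at hq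
        cases hf : firstFit w t with
        | some j =>
            rw [hf] at hq
            have hq2 : queryGo (2^K) (treeOf (vOf w) (2^K)) t 1 0 (2^K) = ((j:Int)) := by
              rw [hq]
            have hjlt : j < w.length := firstFit_lt t w j hf
            have hstepA : stepA (2^K) T (w, treeOf (vOf w) (2^K), last) t =
                (w.set j (w.getD j 0 - t),
                 update (2^K) (treeOf (vOf w) (2^K)) j (w.getD j 0 - t), (j:Int)) := by
              simp only [stepA]
              rw [if_neg hw0, hq2]
              rw [if_neg (show ¬ (((j:Int)) = -1 ∨ ((w.length:Int)) ≤ ((j:Int))) by omega)]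
              simp
            have hstepB : stepB T (w, last) t = (w.set j (w.getD j 0 - t), (j:Int)) := by
              simp only [stepB, hf]
            rw [hstepA, hstepB]
            rw [update_correct K (vOf w) j (by omega) (w.getD j 0 - t), ← vOf_set w j _ hjlt]
            refine ih (w.set j (w.getD j 0 - t)) (j:Int) ?_
            simp at h ⊢
            omega
        | none =>
            rw [hf] at hq
            have hq2 : queryGo (2^K) (treeOf (vOf w) (2^K)) t 1 0 (2^K) =
                (if t ≤ 0 ∧ w.length < 2^K then ((w.length:Int)) else -1) := by
              rw [hq]
            have hwlt : w.length < 2^K := by simp at h; omega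
            have hguard : queryGo (2^K) (treeOf (vOf w) (2^K)) t 1 0 (2^K) = -1 ∨
                ((w.length:Int)) ≤ queryGo (2^K) (treeOf (vOf w) (2^K)) t 1 0 (2^K) := by
              rw [hq2]
              by_cases hts : t ≤ 0 ∧ w.length < 2^K
              · rw [if_pos hts]; right; omega
              · rw [if_neg hts]; left; rfl
            have hstepA : stepA (2^K) T (w, treeOf (vOf w) (2^K), last) t =
                (w ++ [T - t],
                 update (2^K) (treeOf (vOf w) (2^K)) w.length (T - t), ((w.length:Int))) := by
              simp only [stepA]
              rw [if_neg hw0, if_pos hguard]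
            have hstepB : stepB T (w, last) t = (w ++ [T - t], ((w.length:Int))) := by
              simp only [stepB, hf]
            rw [hstepA, hstepB]
            rw [update_correct K (vOf w) w.length hwlt (T - t), ← vOf_append w (T - t)]
            refine ih (w ++ [T - t]) ((w.length:Int)) ?_
            simp at h ⊢
            omega

-- initial tree of zeros is the segment tree of the empty warehouse list
theorem replicate_treeOf (K : Nat) :
    List.replicate (2*2^K) (0:Int) = treeOf (vOf []) (2^K) := by
  have hv : vOf ([] : List Int) = fun _ => 0 := by funext q; simp [vOf]
  refine List.ext_getElem (by simp [treeOf]) ?_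
  intro p h1 h2
  have hp : p < 2*2^K := by simpa using h1
  rw [List.getElem_replicate, ← List.getD_eq_getElem (treeOf (vOf []) (2^K)) 0 h2,
    treeOf_getD _ _ _ hp, hv, nodeVal_zero]

-- ===== VERDICT (by name: the statement is the Claim_ definition above) =====
theorem coal_spec : Claim_equal_coal := by
  intro A T hdom
  show coal A T = coal_alt A T
  unfold coal coal_alt
  obtain ⟨K, hK⟩ := sizeLoop_pow A.length 1 (by omega) ⟨0, by norm_num⟩
  have hge := (sizeLoop_ge A.length 1 (by omega)).1
  rw [hK] at hge
  simp only []
  rw [hK, replicate_treeOf K]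
  exact coal_fold K T A [] 0 (by simpa using hge)
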